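-- pv_equiv track=rewrite | github.com/anb6536/Spellotron | try.py | extraAutocorrect
-- ===== SOURCE A (Python) =====
-- def extraAutocorrect( engList, word ):
--     wordList = []
--     wordList += word
--     for i in engList:
--         if len( wordList ) == len( i ):
--             if i == wordList:
--                 return wordList
--     for i in engList:
--         if len( wordList )-1 == len ( i ):
--             if i == wordList:
--                 return wordList
--             else:
--                 for index in range ( len( wordList ) ):
--                     temp = wordList[index]
--                     temp1 = wordList[0:index]
--                     temp2 = wordList[index+1:]
--                     wordList = temp1 + temp2
--                     if wordList == i:
--                         return i
--                     else:
--                         wordList = temp1 + [temp] + temp2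
-- ===== SOURCE B (Python) =====
-- def extraAutocorrect(engList, word):
--     chars = list(word)
--     for cand in engList:
--         if cand == chars:
--             return chars
--     n = len(chars)
--     for cand in engList:
--         if len(cand) == n - 1 and _one_deletion(chars, cand):
--             return cand
--     return None
--
--
-- def _one_deletion(long, short):
--     # two-pointer: skip the common prefix, then the rest of `long`
--     # (minus one char) must equal the rest of `short`
--     j = 0
--     while j < len(short) and j < len(long) and long[j] == short[j]:
--         j += 1
--     return long[j + 1:] == short[j:]
-- ===== Notes on version B (the rewrite author's own statement) =====
-- stated objective: alternative
-- what changed: A tries every single-index deletion of the word per candidate, rebuilding and restoring the list each time; B runs one two-pointer one-deletion test per candidate of the right length, keeping engList order.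
import Mathlib
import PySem

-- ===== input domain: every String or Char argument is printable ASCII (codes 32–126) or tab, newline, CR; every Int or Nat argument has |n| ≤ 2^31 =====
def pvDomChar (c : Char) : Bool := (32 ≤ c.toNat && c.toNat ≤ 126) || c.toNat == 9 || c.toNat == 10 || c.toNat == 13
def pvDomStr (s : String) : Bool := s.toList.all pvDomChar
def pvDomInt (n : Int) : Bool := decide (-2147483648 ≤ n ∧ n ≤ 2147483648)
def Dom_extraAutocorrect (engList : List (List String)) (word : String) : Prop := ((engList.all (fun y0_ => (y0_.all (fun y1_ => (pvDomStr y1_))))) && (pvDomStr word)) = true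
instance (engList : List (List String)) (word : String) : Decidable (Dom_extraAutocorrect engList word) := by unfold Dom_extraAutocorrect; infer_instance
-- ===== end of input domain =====

-- B replaces A's per-index rebuild-and-restore deletion search with a single
-- two-pointer one-deletion test per candidate of the right length (same results, different algorithm).

-- ===== PORT A =====

-- A's inner 'for index in range(len(wordList))' loop; the mutated wordList is threaded
-- as state and returned (Python mutates the variable in place and restores it).
def pvInnerA (i : List String) : List String → List Int → Option (List String) × List String
  | wl, [] => (none, wl)
  | wl, idx :: rest =>
    -- temp = wordList[index]; index comes from range(len(wordList)), so always in range
    -- and the IndexError branch of pyGet? is unreachable (getD 's default is dead code)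
    let temp := (PySem.List.pyGet? wl idx).getD ""
    let temp1 := PySem.List.slice wl (some 0) (some idx)      -- wordList[0:index]
    let temp2 := PySem.List.slice wl (some (idx + 1)) none    -- wordList[index+1:]
    if temp1 ++ temp2 = i then (some i, temp1 ++ temp2)
    else pvInnerA i (temp1 ++ [temp] ++ temp2) rest

-- A's first 'for i in engList' loop
def pvLoop1A (wordList : List String) : List (List String) → Option (List String)
  | [] => none
  | i :: rest =>
    if wordList.length = i.length then
      if i = wordList then some wordList else pvLoop1A wordList rest
    else pvLoop1A wordList rest

-- A's second 'for i in engList' loop (wordList state threaded through the inner loop)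
def pvLoop2A : List String → List (List String) → Option (List String)
  | _, [] => none
  | wordList, i :: rest =>
    if (wordList.length : Int) - 1 = (i.length : Int) then
      if i = wordList then some wordList
      else
        match pvInnerA i wordList (PySem.List.pyRange 0 (wordList.length : Int) 1) with
        | (some r, _) => some r
        | (none, wordList') => pvLoop2A wordList' rest
    else pvLoop2A wordList rest

def extraAutocorrect (engList : List (List String)) (word : String) : Option (List String) :=
  let wordList : List String := word.toList.map (fun c => String.ofList [c])  -- wordList += word
  match pvLoop1A wordList engList with
  | some r => some r
  | none => pvLoop2A wordList engList

-- ===== PORT B =====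

-- B's two-pointer scan: advance j while chars match (the 'while' loop of _one_deletion)
def pvOdAdvance (long short : List String) (j : Nat) : Nat :=
  if j < short.length ∧ j < long.length ∧ long.getD j "" = short.getD j "" then
    pvOdAdvance long short (j + 1)
  else j
termination_by short.length - j
decreasing_by omega

-- _one_deletion(long, short): long[j+1:] == short[j:] after skipping the common prefix
def pvOneDeletion (long short : List String) : Bool :=
  let j := pvOdAdvance long short 0
  decide (PySem.List.slice long (some ((j + 1 : Nat) : Int)) none
            = PySem.List.slice short (some ((j : Nat) : Int)) none)

-- B's first loop: exact match
def pvBloop1 (chars : List String) : List (List String) → Option (List String)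
  | [] => none
  | cand :: rest => if cand = chars then some chars else pvBloop1 chars rest

-- B's second loop: length guard + one-deletion test
def pvBloop2 (chars : List String) (n : Nat) : List (List String) → Option (List String)
  | [] => none
  | cand :: rest =>
    if (cand.length : Int) = (n : Int) - 1 ∧ pvOneDeletion chars cand = true then some cand
    else pvBloop2 chars n rest

def extraAutocorrect_alt (engList : List (List String)) (word : String) : Option (List String) :=
  let chars : List String := word.toList.map (fun c => String.ofList [c])  -- chars = list(word)
  match pvBloop1 chars engList with
  | some r => some r
  | none => pvBloop2 chars chars.length engList

-- ===== PRECONDITION & SPEC =====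
def Spec_extraAutocorrect (engList : List (List String)) (word : String) (out : Option (List String)) : Prop := out = extraAutocorrect_alt engList word
instance (engList : List (List String)) (word : String) (out : Option (List String)) : Decidable (Spec_extraAutocorrect engList word out) := by unfold Spec_extraAutocorrect; infer_instance

-- ===== CLAIM (what is proved, stated in full; the proofs are below) =====
def Claim_equal_extraAutocorrect : Prop := ∀ (engList : List (List String)) (word : String), Dom_extraAutocorrect engList word → Spec_extraAutocorrect engList word (extraAutocorrect engList word)

-- ===== LEMMAS AND PROOFS =====

-- proof-side structural version of the two-pointer test
def pvDel1 : List String → List String → Bool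
  | a :: as, b :: bs => if a = b then pvDel1 as bs else decide (as = b :: bs)
  | long, short => decide (long.drop 1 = short)

theorem pvOdAdvance_cons (a b : String) (as bs : List String) :
    ∀ (j : Nat), pvOdAdvance (a :: as) (b :: bs) (j + 1) = pvOdAdvance as bs j + 1 := by
  intro j
  induction hn : bs.length - j generalizing j with
  | zero =>
    have hj : ¬ j < bs.length := by omega
    conv_lhs => rw [pvOdAdvance]
    conv_rhs => rw [pvOdAdvance]
    rw [if_neg (fun hcon => hj (by simpa using hcon.1)), if_neg (fun hcon => hj hcon.1)]
  | succ n ih =>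
    conv_lhs => rw [pvOdAdvance]
    conv_rhs => rw [pvOdAdvance]
    by_cases hc : j < bs.length ∧ j < as.length ∧ as.getD j "" = bs.getD j ""
    · have hcL : j + 1 < (b :: bs).length ∧ j + 1 < (a :: as).length ∧
          (a :: as).getD (j + 1) "" = (b :: bs).getD (j + 1) "" := by
        simp only [List.length_cons, List.getD_cons_succ, Nat.add_lt_add_iff_right]
        exact hc
      rw [if_pos hcL, if_pos hc]
      exact ih (j + 1) (by omega)
    · have hcL : ¬ (j + 1 < (b :: bs).length ∧ j + 1 < (a :: as).length ∧
          (a :: as).getD (j + 1) "" = (b :: bs).getD (j + 1) "") := by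
        simp only [List.length_cons, List.getD_cons_succ, Nat.add_lt_add_iff_right]
        exact hc
      rw [if_neg hcL, if_neg hc]

theorem pvOneDeletion_drop (long short : List String) :
    pvOneDeletion long short =
      decide (long.drop (pvOdAdvance long short 0 + 1) = short.drop (pvOdAdvance long short 0)) := by
  simp only [pvOneDeletion, PySem.List.slice_from_natCast]

theorem pvOneDeletion_eq_del1 : ∀ (long short : List String),
    pvOneDeletion long short = pvDel1 long short := by
  intro long
  induction long with
  | nil =>
    intro short
    rw [pvOneDeletion_drop]
    conv_lhs => rw [pvOdAdvance]
    rw [if_neg (by simp)]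
    cases short <;> simp [pvDel1]
  | cons a as ih =>
    intro short
    cases short with
    | nil =>
      rw [pvOneDeletion_drop]
      conv_lhs => rw [pvOdAdvance]
      rw [if_neg (by simp)]
      simp [pvDel1]
    | cons b bs =>
      by_cases hab : a = b
      · rw [pvOneDeletion_drop]
        conv_lhs => rw [pvOdAdvance]
        rw [if_pos (by simp [hab])]
        rw [pvOdAdvance_cons]
        have h1 : pvDel1 (a :: as) (b :: bs) = pvDel1 as bs := by simp [pvDel1, hab]
        rw [h1, ← ih bs, pvOneDeletion_drop]
        simp only [List.drop_succ_cons]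
        rfl
      · rw [pvOneDeletion_drop]
        conv_lhs => rw [pvOdAdvance]
        rw [if_neg (by simp [hab])]
        simp [pvDel1, hab]

theorem pvDel1_iff : ∀ (long short : List String), short.length + 1 = long.length →
    (pvDel1 long short = true ↔ ∃ j, j < long.length ∧ long.eraseIdx j = short) := by
  intro long
  induction long with
  | nil => intro short h; simp at h
  | cons a as ih =>
    intro short hlen
    cases short with
    | nil =>
      have has : as = [] := List.length_eq_zero_iff.mp (by simpa using hlen)
      subst has
      constructor
      · intro _; exact ⟨0, by simp, by simp⟩
      · intro _; simp [pvDel1]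
    | cons b bs =>
      have hlen' : bs.length + 1 = as.length := by simpa using hlen
      by_cases hab : a = b
      · subst hab
        have hstep : pvDel1 (a :: as) (a :: bs) = pvDel1 as bs := by simp [pvDel1]
        rw [hstep, ih bs hlen']
        constructor
        · rintro ⟨j, hj, hje⟩
          exact ⟨j + 1, by simpa using hj, by simpa [List.eraseIdx_cons_succ] using hje⟩
        · rintro ⟨j, hj, hje⟩
          cases j with
          | zero =>
            -- deleting the head: as = a :: bs, so deleting the head of as also gives bs
            simp only [List.eraseIdx_cons_zero] at hje
            refine ⟨0, by omega, ?_⟩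
            simp [hje]
          | succ k =>
            simp only [List.eraseIdx_cons_succ, List.cons.injEq, true_and] at hje
            exact ⟨k, by simpa using hj, hje⟩
      · have hstep : pvDel1 (a :: as) (b :: bs) = decide (as = b :: bs) := by
          simp [pvDel1, hab]
        rw [hstep]
        simp only [decide_eq_true_eq]
        constructor
        · intro h; exact ⟨0, by omega, by simpa using h⟩
        · rintro ⟨j, hj, hje⟩
          cases j with
          | zero => simpa using hje
          | succ k =>
            exfalso
            simp only [List.eraseIdx_cons_succ, List.cons.injEq] at hje
            exact hab hje.1

-- one step of A's inner loop at an in-range index k: the deleted list and the restore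
theorem pvInnerA_step (i wl : List String) (k : Nat) (hk : k < wl.length) (rest : List Int) :
    pvInnerA i wl ((k : Int) :: rest) =
      if wl.eraseIdx k = i then (some i, wl.eraseIdx k) else pvInnerA i wl rest := by
  have htemp : (PySem.List.pyGet? wl (k : Int)).getD "" = wl[k] := by
    rw [PySem.List.pyGet?_natCast]
    simp [List.getElem?_eq_getElem hk]
  have h1 : PySem.List.slice wl (some (0 : Int)) (some (k : Int)) = wl.take k := by
    rw [show (0 : Int) = ((0 : Nat) : Int) by simp, PySem.List.slice_natCast]
    simp
  have h2 : PySem.List.slice wl (some ((k : Int) + 1)) none = wl.drop (k + 1) := by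
    rw [show (k : Int) + 1 = ((k + 1 : Nat) : Int) by push_cast; ring,
      PySem.List.slice_from_natCast]
  have herase : wl.take k ++ wl.drop (k + 1) = wl.eraseIdx k :=
    (List.eraseIdx_eq_take_drop_succ wl k).symm
  have hrestore : wl.take k ++ [wl[k]] ++ wl.drop (k + 1) = wl := by
    rw [List.append_assoc, List.singleton_append, List.getElem_cons_drop hk,
      List.take_append_drop]
  rw [pvInnerA]
  simp only [htemp, h1, h2, herase]
  split_ifs with h
  · rfl
  · rw [hrestore]

theorem pvInnerA_spec (i wl : List String) : ∀ (k : Nat), k ≤ wl.length →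
    ((∃ j, k ≤ j ∧ j < wl.length ∧ wl.eraseIdx j = i) →
        pvInnerA i wl (PySem.List.pyRange (k : Int) (wl.length : Int) 1) = (some i, i))
    ∧ (¬ (∃ j, k ≤ j ∧ j < wl.length ∧ wl.eraseIdx j = i) →
        pvInnerA i wl (PySem.List.pyRange (k : Int) (wl.length : Int) 1) = (none, wl)) := by
  intro k hk
  induction hn : wl.length - k generalizing k with
  | zero =>
    have hke : k = wl.length := by omega
    rw [PySem.List.pyRange_one_eq_nil (by omega)]
    constructor
    · rintro ⟨j, hj1, hj2, -⟩; omega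
    · intro _; rfl
  | succ n ih =>
    have hklt : k < wl.length := by omega
    rw [PySem.List.pyRange_one_cons (by exact_mod_cast hklt)]
    rw [show (k : Int) + 1 = ((k + 1 : Nat) : Int) by push_cast; ring]
    rw [pvInnerA_step i wl k hklt]
    by_cases hcur : wl.eraseIdx k = i
    · rw [if_pos hcur]
      constructor
      · intro _; rw [hcur]
      · intro hno; exact absurd ⟨k, le_refl k, hklt, hcur⟩ hno
    · rw [if_neg hcur]
      obtain ⟨ih1, ih2⟩ := ih (k + 1) (by omega) (by omega)
      constructor
      · rintro ⟨j, hj1, hj2, hje⟩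
        refine ih1 ⟨j, ?_, hj2, hje⟩
        rcases Nat.eq_or_lt_of_le hj1 with h | h
        · exact absurd (by rw [h]; exact hje) hcur
        · omega
      · intro hno
        refine ih2 fun hex => hno ?_
        obtain ⟨j, hj1, hj2, hje⟩ := hex
        exact ⟨j, by omega, hj2, hje⟩

theorem pvLoop1_eq (wl : List String) : ∀ (l : List (List String)),
    pvLoop1A wl l = pvBloop1 wl l := by
  intro l
  induction l with
  | nil => rfl
  | cons i rest ih =>
    rw [pvLoop1A, pvBloop1]
    by_cases hiw : i = wl
    · subst hiw; simp
    · rw [if_neg hiw]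
      split_ifs <;> exact ih

theorem pvLoop2_eq (wl : List String) : ∀ (l : List (List String)),
    pvLoop2A wl l = pvBloop2 wl wl.length l := by
  intro l
  induction l with
  | nil => rfl
  | cons i rest ih =>
    rw [pvLoop2A, pvBloop2]
    by_cases hlen : (wl.length : Int) - 1 = (i.length : Int)
    · have hlen' : i.length + 1 = wl.length := by omega
      have hne : i ≠ wl := by
        intro h; rw [h] at hlen'; omega
      rw [if_pos hlen, if_neg hne]
      have hdel := pvDel1_iff wl i hlen'
      obtain ⟨h1, h2⟩ := pvInnerA_spec i wl 0 (Nat.zero_le _)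
      simp only [Nat.cast_zero] at h1 h2
      by_cases hex : ∃ j, j < wl.length ∧ wl.eraseIdx j = i
      · have hex' : ∃ j, 0 ≤ j ∧ j < wl.length ∧ wl.eraseIdx j = i := by
          obtain ⟨j, hj1, hj2⟩ := hex; exact ⟨j, Nat.zero_le j, hj1, hj2⟩
        rw [h1 hex']
        rw [if_pos ⟨by omega, by rw [pvOneDeletion_eq_del1]; exact hdel.mpr hex⟩]
      · have hex' : ¬ ∃ j, 0 ≤ j ∧ j < wl.length ∧ wl.eraseIdx j = i := by
          rintro ⟨j, -, hj1, hj2⟩; exact hex ⟨j, hj1, hj2⟩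
        rw [h2 hex']
        rw [if_neg (by
          rintro ⟨-, hod⟩
          rw [pvOneDeletion_eq_del1] at hod
          exact hex (hdel.mp hod))]
        exact ih
    · rw [if_neg hlen, if_neg (by rintro ⟨h, -⟩; omega)]
      exact ih

-- ===== VERDICT (by name: the statement is the Claim_ definition above) =====
theorem extraAutocorrect_spec : Claim_equal_extraAutocorrect := by
  unfold Claim_equal_extraAutocorrect
  intro engList word _dom
  unfold Spec_extraAutocorrect
  simp only [extraAutocorrect, extraAutocorrect_alt, pvLoop1_eq, pvLoop2_eq]
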